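-- pv_equiv track=rewrite | github.com/uwahhh/SC4079-Final-Year-Project | query_generator.py | generate_prefix_phrases
-- ===== SOURCE A (Python) =====
-- def generate_prefix_phrases(queries):
--     phrases = []
--     seen = set()
--
--     for query in queries:
--         words = query.split()
--         for i in range(1, len(words) + 1):
--             prefix = " ".join(words[:i])
--             if prefix not in seen:
--                 seen.add(prefix)
--                 phrases.append(prefix)
--
--     return phrases
-- ===== SOURCE B (Python) =====
-- def generate_prefix_phrases(queries):
--     # Word-level trie: dedup is structural (node existence), no string set,
--     # no membership test on prefix strings; prefix built incrementally.
--     trie = {}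
--     phrases = []
--     for query in queries:
--         node = trie
--         prefix = ""
--         for w in query.split():
--             prefix = w if prefix == "" else prefix + " " + w
--             if w in node:
--                 node = node[w]
--             else:
--                 child = {}
--                 node[w] = child
--                 phrases.append(prefix)
--                 node = child
--     return phrases
-- ===== Notes on version B (the rewrite author's own statement) =====
-- stated objective: alternative
-- what changed: B replaces A's global string seen-set and join-over-slice prefix enumeration with a word-level trie: deduplication becomes structural (a prefix is new iff its word path creates a new trie node) and the prefix string is built incrementally while descending, so the per-index membership test on whole prefix strings and the repeated slicing/joining disappear.
import Mathlib
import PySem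

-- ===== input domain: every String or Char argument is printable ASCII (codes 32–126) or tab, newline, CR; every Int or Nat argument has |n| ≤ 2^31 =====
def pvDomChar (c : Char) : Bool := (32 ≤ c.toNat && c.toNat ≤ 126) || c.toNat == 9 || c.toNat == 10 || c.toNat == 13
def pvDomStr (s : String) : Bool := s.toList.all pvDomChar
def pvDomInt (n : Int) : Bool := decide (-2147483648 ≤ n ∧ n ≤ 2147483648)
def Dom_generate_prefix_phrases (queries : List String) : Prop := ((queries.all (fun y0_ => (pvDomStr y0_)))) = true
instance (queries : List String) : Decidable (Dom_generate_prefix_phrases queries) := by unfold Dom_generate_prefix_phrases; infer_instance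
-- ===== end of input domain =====

-- B replaces A's string seen-set and join-over-slice enumeration by a word-level trie:
-- a prefix is emitted iff its word path creates a new trie node (structural dedup),
-- and the prefix string grows incrementally during the descent; equal output.

-- ===== PORT A =====
def generate_prefix_phrases (queries : List String) : List String :=
  (queries.foldl
    (fun (st : List String × PySem.Set String) query =>
      let words := PySem.Str.split₀ query
      (PySem.List.pyRange 1 ((words.length : Int) + 1) 1).foldl
        (fun st i =>
          let pfx := PySem.Str.join " " (PySem.List.slice words none (some i))
          if !PySem.Set.contains st.2 pfx then
            (st.1 ++ [pfx], PySem.Set.add st.2 pfx)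
          else st)
        st)
    ([], PySem.Set.empty)).1

-- ===== PORT B =====
-- Python's trie of nested dicts, ported as an association tree in insertion order:
-- 'PvTrie.cons key child siblings' is one (key -> child-dict) entry; '{}' is PvTrie.nil.
-- Only membership lookup and fresh-key insertion are used, so this is exact for dict.
inductive PvTrie : Type
  | nil : PvTrie
  | cons : String → PvTrie → PvTrie → PvTrie
deriving DecidableEq, Repr

-- 'w in node' / 'node[w]' (first match; keys are unique by construction)
def pvFind : PvTrie → String → Option PvTrie
  | .nil, _ => none
  | .cons k sub rest, w => if k = w then some sub else pvFind rest w

-- 'node[w] = child' when w is already a key: replace in place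
def pvSet : PvTrie → String → PvTrie → PvTrie
  | .nil, _, _ => .nil
  | .cons k t rest, w, sub => if k = w then .cons k sub rest else .cons k t (pvSet rest w sub)

-- 'node[w] = child' when w is a fresh key: append at the end (dict insertion order)
def pvAppend : PvTrie → String → PvTrie → PvTrie
  | .nil, w, sub => .cons w sub .nil
  | .cons k t rest, w, sub => .cons k t (pvAppend rest w sub)

-- Python 'a + b' on str: concatenation of the character sequences (exact)
def pvStrCat (a b : String) : String := String.ofList (a.toList ++ b.toList)

-- the inner 'for w in words' loop of Source B: walks/extends the trie from the current
-- node, threading the incremental prefix, returns (new subtree, emitted phrases)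
def pvInsert : PvTrie → String → List String → PvTrie × List String
  | ch, _, [] => (ch, [])
  | ch, pfx, w :: ws =>
    let pfx' := if pfx = "" then w else pvStrCat (pvStrCat pfx " ") w
    match pvFind ch w with
    | some sub =>
        let r := pvInsert sub pfx' ws
        (pvSet ch w r.1, r.2)
    | none =>
        let r := pvInsert .nil pfx' ws
        (pvAppend ch w r.1, pfx' :: r.2)

def generate_prefix_phrases_alt (queries : List String) : List String :=
  (queries.foldl
    (fun (st : PvTrie × List String) query =>
      let r := pvInsert st.1 "" (PySem.Str.split₀ query)
      (r.1, st.2 ++ r.2))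
    (.nil, [])).2

-- ===== PRECONDITION & SPEC =====
def Spec_generate_prefix_phrases (queries : List String) (out : List String) : Prop := out = generate_prefix_phrases_alt queries
instance (queries : List String) (out : List String) : Decidable (Spec_generate_prefix_phrases queries out) := by unfold Spec_generate_prefix_phrases; infer_instance

-- ===== CLAIM (what is proved, stated in full; the proofs are below) =====
def Claim_equal_generate_prefix_phrases : Prop := ∀ (queries : List String), Dom_generate_prefix_phrases queries → Spec_generate_prefix_phrases queries (generate_prefix_phrases queries)

-- ===== LEMMAS AND PROOFS =====

-- ---- proof-only helpers ----

-- join with a single space (A's prefix strings)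
def pvJ (ps : List String) : String := PySem.Str.join " " ps

-- the nonempty word-prefixes of a word list, shortest first
def pvPrefixes : List String → List (List String)
  | [] => []
  | w :: ws => [w] :: (pvPrefixes ws).map (w :: ·)

-- path membership in the trie
def pvHas : PvTrie → List String → Bool
  | _, [] => true
  | ch, w :: p =>
    match pvFind ch w with
    | some sub => pvHas sub p
    | none => false

-- a word as produced by str.split(): nonempty, no whitespace characters
def pvWordlike (w : String) : Prop :=
  w.toList ≠ [] ∧ ∀ c ∈ w.toList, PySem.Chars.isspace c = false

-- ---- split() produces wordlike words ----

theorem pv_split_go_wordlike (s : List Char) :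
    ∀ (cur : List Char) (acc : List (List Char)),
      (∀ c ∈ cur, PySem.Chars.isspace c = false) →
      (∀ w ∈ acc, w ≠ [] ∧ ∀ c ∈ w, PySem.Chars.isspace c = false) →
      ∀ w ∈ PySem.Chars.split₀.go s cur acc, w ≠ [] ∧ ∀ c ∈ w, PySem.Chars.isspace c = false := by
  induction s with
  | nil =>
      intro cur acc hcur hacc w hw
      simp only [PySem.Chars.split₀.go] at hw
      by_cases hc : cur.isEmpty
      · rw [if_pos hc] at hw
        exact hacc w (List.mem_reverse.mp hw)
      · rw [if_neg hc] at hw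
        rw [List.mem_reverse] at hw
        rcases List.mem_cons.mp hw with h | h
        · subst h
          have hcur_ne : cur ≠ [] := by simpa [List.isEmpty_iff] using hc
          refine ⟨?_, ?_⟩
          · intro hrev; exact hcur_ne (List.reverse_eq_nil_iff.mp hrev)
          · intro c hcmem
            exact hcur c (List.mem_reverse.mp hcmem)
        · exact hacc w h
  | cons c rest ih =>
      intro cur acc hcur hacc w hw
      simp only [PySem.Chars.split₀.go] at hw
      by_cases hs : PySem.Chars.isspace c
      · rw [if_pos hs] at hw
        by_cases hc : cur.isEmpty
        · rw [if_pos hc] at hw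
          exact ih [] acc (by simp) hacc w hw
        · rw [if_neg hc] at hw
          refine ih [] (cur.reverse :: acc) (by simp) ?_ w hw
          intro v hv
          rcases List.mem_cons.mp hv with h | h
          · subst h
            have hcur_ne : cur ≠ [] := by simpa [List.isEmpty_iff] using hc
            refine ⟨?_, ?_⟩
            · intro hrev; exact hcur_ne (List.reverse_eq_nil_iff.mp hrev)
            · intro c' hc'
              exact hcur c' (List.mem_reverse.mp hc')
          · exact hacc v h
      · rw [if_neg hs] at hw
        refine ih (c :: cur) acc ?_ hacc w hw
        intro v hv
        rcases List.mem_cons.mp hv with h | h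
        · subst h; simpa using hs
        · exact hcur v h


theorem pv_split_wordlike (q : String) : ∀ w ∈ PySem.Str.split₀ q, pvWordlike w := by
  intro w hw
  have hdef : PySem.Str.split₀ q = (PySem.Chars.split₀ q.toList).map String.ofList := rfl
  rw [hdef] at hw
  rcases List.mem_map.mp hw with ⟨cs, hcs, rfl⟩
  have h := pv_split_go_wordlike q.toList [] [] (by simp) (by simp) cs
    (by simpa [PySem.Chars.split₀] using hcs)
  exact ⟨by simpa [String.toList_ofList] using h.1,
         by simpa [String.toList_ofList] using h.2⟩


-- ---- prefixes list: shape facts ----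

theorem pv_prefixes_ne_nil (ws : List String) : ∀ p ∈ pvPrefixes ws, p ≠ [] := by
  induction ws with
  | nil => intro p hp; cases hp
  | cons w ws ih =>
      intro p hp
      simp only [pvPrefixes, List.mem_cons, List.mem_map] at hp
      rcases hp with h | ⟨a, _, rfl⟩ <;> simp_all


theorem pv_prefixes_mem_words (ws : List String) : ∀ p ∈ pvPrefixes ws, ∀ w ∈ p, w ∈ ws := by
  induction ws with
  | nil => intro p hp; cases hp
  | cons w ws ih =>
      intro p hp
      simp only [pvPrefixes, List.mem_cons, List.mem_map] at hp
      rcases hp with h | ⟨a, ha, rfl⟩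
      · subst h; simp
      · intro x hx
        rcases List.mem_cons.mp hx with h | h
        · simp [h]
        · exact List.mem_cons_of_mem _ (ih a ha x h)


theorem pv_prefixes_nodup (ws : List String) : (pvPrefixes ws).Nodup := by
  induction ws with
  | nil => exact List.nodup_nil
  | cons w ws ih =>
      simp only [pvPrefixes]
      refine List.Nodup.cons ?_ (ih.map List.cons_injective)
      intro hmem
      rcases List.mem_map.mp hmem with ⟨a, ha, hEq⟩
      rw [List.cons.injEq] at hEq
      exact (pv_prefixes_ne_nil ws a ha) hEq.2


theorem pv_prefixes_eq_take (ws : List String) :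
    pvPrefixes ws = (List.range ws.length).map (fun k => ws.take (k + 1)) := by
  induction ws with
  | nil => rfl
  | cons w ws ih =>
      rw [pvPrefixes, ih, List.length_cons, List.range_succ_eq_map, List.map_cons,
        List.map_map, List.map_map]
      refine List.cons_eq_cons.mpr ⟨by simp, ?_⟩
      apply List.map_congr_left
      intro k _
      simp [Function.comp, List.take_succ_cons]


-- ---- A's inner emission list is the mapped prefixes list ----

theorem pv_range_one_map (n : Nat) :
    (PySem.List.pyRange 1 ((n : Int) + 1) 1).map Int.toNat = (List.range n).map (fun k => k + 1) := by
  induction n with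
  | zero => rfl
  | succ n ih =>
      have h1 : ((n + 1 : Nat) : Int) + 1 = ((n : Int) + 1) + 1 := by push_cast; ring
      rw [h1, PySem.List.pyRange_one_succ_right (by omega), List.map_append, ih,
        List.range_succ, List.map_append]
      simp


theorem pv_aInner_eq (ws : List String) :
    (PySem.List.pyRange 1 ((ws.length : Int) + 1) 1).map
      (fun i => PySem.Str.join " " (PySem.List.slice ws none (some i)))
    = (pvPrefixes ws).map pvJ := by
  have h1 : (PySem.List.pyRange 1 ((ws.length : Int) + 1) 1).map
      (fun i => PySem.Str.join " " (PySem.List.slice ws none (some i)))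
      = (PySem.List.pyRange 1 ((ws.length : Int) + 1) 1).map
        ((fun k => pvJ (ws.take k)) ∘ Int.toNat) := by
    apply List.map_congr_left
    intro i hi
    have hb : 1 ≤ i ∧ i < (ws.length : Int) + 1 := by
      have := PySem.List.mem_pyRange_one.mp hi
      omega
    simp only [Function.comp]
    rw [PySem.List.slice_to ws (by omega : (0:Int) ≤ i)]
    rfl
  rw [h1, ← List.map_map, pv_range_one_map, List.map_map, pv_prefixes_eq_take, List.map_map]
  rfl


-- ---- injectivity of the space-join on wordlike lists ----

theorem pv_sep_split (p : List Char) :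
    ∀ (q r1 r2 : List Char), ' ' ∉ p → ' ' ∉ q → p ++ ' ' :: r1 = q ++ ' ' :: r2 → p = q ∧ r1 = r2 := by
  induction p with
  | nil =>
      intro q r1 r2 _ hq h
      cases q with
      | nil => simpa using h
      | cons c q' =>
          simp only [List.nil_append, List.cons_append, List.cons.injEq] at h
          have : c = ' ' := h.1.symm
          subst this
          exact absurd (by simp : ' ' ∈ ' ' :: q') hq
  | cons a p' ih =>
      intro q r1 r2 hp hq h
      cases q with
      | nil =>
          simp only [List.cons_append, List.nil_append, List.cons.injEq] at h
          have : a = ' ' := h.1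
          subst this
          exact absurd (by simp : ' ' ∈ ' ' :: p') hp
      | cons b q' =>
          simp only [List.cons_append, List.cons.injEq] at h
          obtain ⟨hab, htail⟩ := h
          have hrec := ih q' r1 r2 (fun hm => hp (List.mem_cons_of_mem _ hm))
            (fun hm => hq (List.mem_cons_of_mem _ hm)) htail
          exact ⟨by rw [hab, hrec.1], hrec.2⟩


theorem pv_intercalate_cons (x : List Char) (xs : List (List Char)) :
    [' '].intercalate (x :: xs) = if xs = [] then x else x ++ ' ' :: [' '].intercalate xs := by
  cases xs <;> simp [List.intercalate, List.intersperse]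

theorem pv_intercalate_inj (ps : List (List Char)) :
    ∀ (qs : List (List Char)),
      (∀ x ∈ ps, x ≠ [] ∧ ' ' ∉ x) → (∀ x ∈ qs, x ≠ [] ∧ ' ' ∉ x) →
      [' '].intercalate ps = [' '].intercalate qs → ps = qs := by
  induction ps with
  | nil =>
      intro qs hps hqs h
      cases qs with
      | nil => rfl
      | cons y ys =>
          rw [pv_intercalate_cons] at h
          by_cases hys : ys = []
          · rw [if_pos hys] at h
            exact absurd ((by simpa [List.intercalate] using h.symm : y = []))
              (hqs y (by simp)).1
          · rw [if_neg hys] at h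
            simp [List.intercalate] at h
  | cons x xs ih =>
      intro qs hps hqs h
      cases qs with
      | nil =>
          rw [pv_intercalate_cons] at h
          by_cases hxs : xs = []
          · rw [if_pos hxs] at h
            exact absurd ((by simpa [List.intercalate] using h : x = []))
              (hps x (by simp)).1
          · rw [if_neg hxs] at h
            simp [List.intercalate] at h
      | cons y ys =>
          rw [pv_intercalate_cons, pv_intercalate_cons] at h
          by_cases hxs : xs = [] <;> by_cases hys : ys = []
          · subst hxs; subst hys
            rw [if_pos rfl, if_pos rfl] at h
            rw [h]
          · subst hxs
            rw [if_pos rfl, if_neg hys] at h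
            have hsp : ' ' ∈ x := by rw [h]; simp
            exact absurd hsp (hps x (by simp)).2
          · subst hys
            rw [if_neg hxs, if_pos rfl] at h
            have hsp : ' ' ∈ y := by rw [← h]; simp
            exact absurd hsp (hqs y (by simp)).2
          · rw [if_neg hxs, if_neg hys] at h
            have hsep := pv_sep_split x y ([' '].intercalate xs) ([' '].intercalate ys)
              (hps x (by simp)).2 (hqs y (by simp)).2 h
            have htl := ih ys (fun a ha => hps a (List.mem_cons_of_mem _ ha))
              (fun a ha => hqs a (List.mem_cons_of_mem _ ha)) hsep.2
            rw [hsep.1, htl]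


theorem pv_J_inj (ps qs : List String)
    (hp : ∀ w ∈ ps, pvWordlike w) (hq : ∀ w ∈ qs, pvWordlike w)
    (h : pvJ ps = pvJ qs) : ps = qs := by
  have hsep : (" " : String).toList = [' '] := rfl
  have h' : [' '].intercalate (ps.map String.toList) = [' '].intercalate (qs.map String.toList) := by
    have hc := congrArg String.toList h
    simpa [pvJ, PySem.Str.join, PySem.Chars.join, hsep, String.toList_ofList] using hc
  have side : ∀ (l : List String), (∀ w ∈ l, pvWordlike w) →
      ∀ x ∈ l.map String.toList, x ≠ [] ∧ ' ' ∉ x := by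
    intro l hl x hx
    rcases List.mem_map.mp hx with ⟨w, hw, rfl⟩
    obtain ⟨h1, h2⟩ := hl w hw
    exact ⟨h1, fun hsp => absurd (h2 ' ' hsp) (by decide)⟩
  have hmap := pv_intercalate_inj (ps.map String.toList) (qs.map String.toList)
    (side ps hp) (side qs hq) h'
  exact List.map_injective_iff.mpr (fun _ _ hh => String.toList_injective hh) hmap


-- ---- the incremental prefix concatenation equals the join ----

theorem pv_J_nil : pvJ [] = "" := by
  rfl


theorem pv_J_append_chars (xs : List (List Char)) (y : List Char) (h : xs ≠ []) :
    [' '].intercalate (xs ++ [y]) = [' '].intercalate xs ++ ' ' :: y := by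
  induction xs with
  | nil => exact absurd rfl h
  | cons x xs ih =>
      cases xs with
      | nil => simp [List.intercalate, List.intersperse]
      | cons x2 xs2 =>
          rw [pv_intercalate_cons (x := x) (xs := x2 :: xs2), if_neg (by simp)]
          rw [List.cons_append, pv_intercalate_cons, if_neg (by simp), ih (by simp)]
          simp

theorem pv_J_snoc (pre : List String) (w : String)
    (hp : ∀ x ∈ pre, pvWordlike x) :
    pvJ (pre ++ [w]) = if pvJ pre = "" then w else pvStrCat (pvStrCat (pvJ pre) " ") w := by
  cases pre with
  | nil =>
      rw [if_pos pv_J_nil]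
      apply String.toList_injective
      simp [pvJ, PySem.Str.join, PySem.Chars.join, List.intercalate]
  | cons p ps =>
      have htl : ∀ (l : List String), (pvJ l).toList = [' '].intercalate (l.map String.toList) := by
        intro l
        simp [pvJ, PySem.Str.join, PySem.Chars.join, String.toList_ofList]
      have hne : pvJ (p :: ps) ≠ "" := by
        intro hEq
        have h0 : (pvJ (p :: ps)).toList = [] := by rw [hEq]; rfl
        rw [htl, List.map_cons, pv_intercalate_cons] at h0
        by_cases hps : ps.map String.toList = []
        · rw [if_pos hps] at h0
          exact (hp p (by simp)).1 h0
        · rw [if_neg hps] at h0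
          simp at h0
      rw [if_neg hne]
      apply String.toList_injective
      rw [htl]
      simp only [pvStrCat, String.toList_ofList]
      rw [htl, List.map_append]
      simp only [List.map_cons, List.map_nil]
      rw [pv_J_append_chars _ _ (by simp)]
      simp


-- ---- trie navigation ----

theorem pv_find_set (ch : PvTrie) (w : String) (sub : PvTrie) (h : pvFind ch w = some sub) :
    ∀ (k : String) (sub' : PvTrie),
      pvFind (pvSet ch w sub') k = if k = w then some sub' else pvFind ch k := by
  induction ch with
  | nil => cases h
  | cons k' t rest iht ihr =>
      intro k sub'
      by_cases hk : k' = w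
      · subst hk
        simp only [pvSet, if_pos]
        by_cases hkw : k' = k
        · subst hkw; simp [pvFind]
        · have hne : ¬ k = k' := fun h' => hkw h'.symm
          simp [pvFind, hkw, hne]
      · have h' : pvFind rest w = some sub := by
          simpa [pvFind, hk] using h
        simp only [pvSet, if_neg hk, pvFind]
        by_cases hkk : k' = k
        · subst hkk
          have hne : ¬ k' = w := hk
          simp [hne]
        · simp [hkk, ihr h' k sub']

theorem pv_find_append (ch : PvTrie) (w : String) (h : pvFind ch w = none) :
    ∀ (k : String) (sub' : PvTrie),
      pvFind (pvAppend ch w sub') k = if k = w then some sub' else pvFind ch k := by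
  induction ch with
  | nil =>
      intro k sub'
      simp only [pvAppend, pvFind]
      by_cases hkw : k = w
      · subst hkw; simp
      · have hne : ¬ w = k := fun h' => hkw h'.symm
        simp [hkw, hne]
  | cons k' t rest iht ihr =>
      intro k sub'
      have hk : ¬ k' = w := by
        intro hh; subst hh; simp [pvFind] at h
      have h' : pvFind rest w = none := by simpa [pvFind, hk] using h
      simp only [pvAppend, pvFind]
      by_cases hkk : k' = k
      · subst hkk
        have hne : ¬ k' = w := hk
        simp [hne]
      · simp [hkk, ihr h' k sub']

-- ---- what one insertion emits, and what it stores ----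

theorem pv_insert_snd (ws : List String) :
    ∀ (ch : PvTrie) (pre : List String),
      (∀ x ∈ pre, pvWordlike x) → (∀ x ∈ ws, pvWordlike x) →
      (pvInsert ch (pvJ pre) ws).2
        = ((pvPrefixes ws).filter (fun p => !pvHas ch p)).map (fun p => pvJ (pre ++ p)) := by
  induction ws with
  | nil => intro ch pre _ _; simp [pvInsert, pvPrefixes]
  | cons w ws ih =>
      intro ch pre hpre hws
      have hw : pvWordlike w := hws w (by simp)
      have hws' : ∀ x ∈ ws, pvWordlike x := fun x hx => hws x (List.mem_cons_of_mem _ hx)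
      have hpre' : ∀ x ∈ pre ++ [w], pvWordlike x := by
        intro x hx
        rcases List.mem_append.mp hx with h | h
        · exact hpre x h
        · rw [List.mem_singleton.mp h]; exact hw
      simp only [pvInsert]
      rw [← pv_J_snoc pre w hpre]
      cases hf : pvFind ch w with
      | some sub =>
          simp only []
          rw [ih sub (pre ++ [w]) hpre' hws']
          have hhead : pvHas ch [w] = true := by simp [pvHas, hf]
          have htail : ∀ a, pvHas ch (w :: a) = pvHas sub a := by
            intro a; simp [pvHas, hf]
          simp only [pvPrefixes, List.filter_cons, hhead, Bool.not_true, List.filter_map,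
            List.map_map]
          rw [if_neg (by simp)]
          rw [List.filter_congr (fun a ha => (by simp [Function.comp, htail a] :
            ((fun p => !pvHas ch p) ∘ fun x => w :: x) a = (fun p => !pvHas sub p) a))]
          rw [List.map_map]
          apply List.map_congr_left
          intro a _
          simp [Function.comp, List.append_assoc]
      | none =>
          simp only []
          rw [ih PvTrie.nil (pre ++ [w]) hpre' hws']
          have hhead : pvHas ch [w] = false := by simp [pvHas, hf]
          have htail : ∀ a, pvHas ch (w :: a) = false := by
            intro a; simp [pvHas, hf]
          have hnilhas : ∀ a ∈ pvPrefixes ws, pvHas PvTrie.nil a = false := by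
            intro a ha
            cases a with
            | nil => exact absurd rfl (pv_prefixes_ne_nil ws _ ha)
            | cons b a' => simp [pvHas, pvFind]
          simp only [pvPrefixes, List.filter_cons, hhead, Bool.not_false, if_true,
            List.filter_map, List.map_cons, List.map_map]
          congr 1
          rw [List.filter_congr (fun a ha => (by simp [Function.comp, htail a] :
            ((fun p => !pvHas ch p) ∘ fun x => w :: x) a = (fun _ => true) a))]
          rw [List.filter_congr (fun a ha => (by simp [hnilhas a ha] :
            (fun p => !pvHas PvTrie.nil p) a = (fun _ => true) a))]
          simp only [List.filter_true]
          apply List.map_congr_left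
          intro a _
          simp [Function.comp, List.append_assoc]


theorem pv_insert_has (ws : List String) :
    ∀ (ch : PvTrie) (pfx : String) (q : List String),
      pvHas (pvInsert ch pfx ws).1 q = (pvHas ch q || decide (q ∈ pvPrefixes ws)) := by
  induction ws with
  | nil =>
      intro ch pfx q
      simp [pvInsert, pvPrefixes]
  | cons w ws ih =>
      intro ch pfx q
      simp only [pvInsert]
      cases hf : pvFind ch w with
      | some sub =>
          simp only []
          cases q with
          | nil => simp [pvHas]
          | cons k p =>
              have hL : pvHas (pvSet ch w (pvInsert sub (if pfx = "" then w else pvStrCat (pvStrCat pfx " ") w) ws).1) (k :: p)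
                  = if k = w then pvHas (pvInsert sub (if pfx = "" then w else pvStrCat (pvStrCat pfx " ") w) ws).1 p
                    else pvHas ch (k :: p) := by
                simp only [pvHas, pv_find_set ch w sub hf k _]
                by_cases hkw : k = w
                · simp [hkw]
                · simp [hkw, pvHas, pvFind]
              rw [hL]
              by_cases hkw : k = w
              · subst hkw
                rw [if_pos rfl, ih]
                have hch : pvHas ch (k :: p) = pvHas sub p := by simp [pvHas, hf]
                have hmem : (k :: p) ∈ pvPrefixes (k :: ws) ↔ (p = [] ∨ p ∈ pvPrefixes ws) := by
                  simp [pvPrefixes]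
                by_cases hp0 : p = []
                · subst hp0
                  simp [pvHas, hch, hmem]
                · simp [hch, hmem, hp0]
              · rw [if_neg hkw]
                have hmem : ¬ ((k :: p) ∈ pvPrefixes (w :: ws)) := by
                  simp only [pvPrefixes, List.mem_cons, List.mem_map]
                  push_neg
                  constructor
                  · intro hEq
                    exact hkw (by injection hEq)
                  · intro a _ hEq
                    exact absurd (by injection hEq : w = k) (fun h' => hkw h'.symm)
                simp [hmem]
      | none =>
          simp only []
          cases q with
          | nil => simp [pvHas]
          | cons k p =>
              have hL : pvHas (pvAppend ch w (pvInsert PvTrie.nil (if pfx = "" then w else pvStrCat (pvStrCat pfx " ") w) ws).1) (k :: p)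
                  = if k = w then pvHas (pvInsert PvTrie.nil (if pfx = "" then w else pvStrCat (pvStrCat pfx " ") w) ws).1 p
                    else pvHas ch (k :: p) := by
                simp only [pvHas, pv_find_append ch w hf k _]
                by_cases hkw : k = w
                · simp [hkw]
                · simp [hkw, pvHas, pvFind]
              rw [hL]
              by_cases hkw : k = w
              · subst hkw
                rw [if_pos rfl, ih]
                have hch : pvHas ch (k :: p) = false := by simp [pvHas, hf]
                have hnil : pvHas PvTrie.nil p = decide (p = []) := by
                  cases p <;> simp [pvHas, pvFind]
                have hmem : (k :: p) ∈ pvPrefixes (k :: ws) ↔ (p = [] ∨ p ∈ pvPrefixes ws) := by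
                  simp [pvPrefixes]
                simp [hch, hnil, hmem]
              · rw [if_neg hkw]
                have hmem : ¬ ((k :: p) ∈ pvPrefixes (w :: ws)) := by
                  simp only [pvPrefixes, List.mem_cons, List.mem_map]
                  push_neg
                  constructor
                  · intro hEq
                    exact hkw (by injection hEq)
                  · intro a _ hEq
                    exact absurd (by injection hEq : w = k) (fun h' => hkw h'.symm)
                simp [hmem]


-- ---- folding Set.add over a Nodup list appends the genuinely new elements ----

theorem pv_foldl_add_filter (xs : List String) :
    ∀ (s : List String), xs.Nodup →
      xs.foldl PySem.Set.add s = s ++ xs.filter (fun x => decide (x ∉ s)) := by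
  induction xs with
  | nil => intro s _; simp
  | cons x xs ih =>
      intro s hnd
      rw [List.foldl_cons]
      have hxs : x ∉ xs := (List.nodup_cons.mp hnd).1
      have hnd' : xs.Nodup := (List.nodup_cons.mp hnd).2
      by_cases hx : x ∈ s
      · rw [PySem.Set.add_of_mem hx, ih s hnd']
        simp [List.filter_cons, hx]
      · rw [PySem.Set.add_of_not_mem hx, ih _ hnd']
        have hf : xs.filter (fun y => decide (y ∉ s ++ [x])) = xs.filter (fun y => decide (y ∉ s)) := by
          apply List.filter_congr
          intro y hy
          have hyx : y ≠ x := fun hEq => hxs (hEq ▸ hy)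
          simp [List.mem_append, hyx]
        rw [hf, List.filter_cons]
        simp [hx]


-- ---- A-side: the pair-state folds flatten (as in the previous analysis) ----

theorem pv_inner_fold (L : List Int) (f : Int → String) (s : List String) :
    L.foldl
      (fun (st : List String × PySem.Set String) i =>
        let pfx := f i
        if !PySem.Set.contains st.2 pfx then (st.1 ++ [pfx], PySem.Set.add st.2 pfx) else st)
      (s, s)
    = ((L.map f).foldl PySem.Set.add s, (L.map f).foldl PySem.Set.add s) := by
  induction L generalizing s with
  | nil => rfl
  | cons a t ih =>
      simp only [List.foldl_cons, List.map_cons]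
      by_cases h : f a ∈ s
      · have hc : PySem.Set.contains s (f a) = true := by
          simp [PySem.Set.contains_eq_listContains, h]
        rw [hc]
        simp only [Bool.not_true, Bool.false_eq_true, if_false]
        rw [PySem.Set.add_of_mem h]
        exact ih s
      · have hc : PySem.Set.contains s (f a) = false := by
          simp [PySem.Set.contains_eq_listContains, h]
        rw [hc]
        simp only [Bool.not_false, if_true]
        rw [PySem.Set.add_of_not_mem h]
        exact ih (s ++ [f a])

theorem pv_outer_fold (queries : List String) (s : List String) :
    queries.foldl
      (fun (st : List String × PySem.Set String) query =>
        let words := PySem.Str.split₀ query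
        (PySem.List.pyRange 1 ((words.length : Int) + 1) 1).foldl
          (fun st i =>
            let pfx := PySem.Str.join " " (PySem.List.slice words none (some i))
            if !PySem.Set.contains st.2 pfx then (st.1 ++ [pfx], PySem.Set.add st.2 pfx) else st)
          st)
      (s, s)
    = ((queries.flatMap (fun q =>
          let words := PySem.Str.split₀ q
          (PySem.List.pyRange 1 ((words.length : Int) + 1) 1).map
            (fun i => PySem.Str.join " " (PySem.List.slice words none (some i))))).foldl
          PySem.Set.add s,
       (queries.flatMap (fun q =>
          let words := PySem.Str.split₀ q
          (PySem.List.pyRange 1 ((words.length : Int) + 1) 1).map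
            (fun i => PySem.Str.join " " (PySem.List.slice words none (some i))))).foldl
          PySem.Set.add s) := by
  induction queries generalizing s with
  | nil => rfl
  | cons q t ih =>
      simp only [List.foldl_cons, List.flatMap_cons, List.foldl_append]
      rw [pv_inner_fold]
      exact ih _

-- ---- B-side: the main fold invariant ----

theorem pv_B_fold (qs : List String) :
    ∀ (T : PvTrie) (acc : List String) (PP : List (List String)),
      (∀ p ∈ PP, ∀ w ∈ p, pvWordlike w) →
      (∀ p : List String, p ≠ [] → (pvHas T p = true ↔ p ∈ PP)) →
      acc = PySem.Set.ofList (PP.map pvJ) →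
      (qs.foldl
        (fun (st : PvTrie × List String) query =>
          let r := pvInsert st.1 "" (PySem.Str.split₀ query)
          (r.1, st.2 ++ r.2))
        (T, acc)).2
      = PySem.Set.ofList ((PP ++ qs.flatMap (fun q => pvPrefixes (PySem.Str.split₀ q))).map pvJ) := by
  induction qs with
  | nil =>
      intro T acc PP hw hinv hacc
      simpa using hacc
  | cons q qs ih =>
      intro T acc PP hw hinv hacc
      have hwords : ∀ x ∈ PySem.Str.split₀ q, pvWordlike x := pv_split_wordlike q
      have hPwordlike : ∀ p ∈ pvPrefixes (PySem.Str.split₀ q), ∀ x ∈ p, pvWordlike x :=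
        fun p hp x hx => hwords x (pv_prefixes_mem_words _ p hp x hx)
      have hsnd : (pvInsert T "" (PySem.Str.split₀ q)).2
          = ((pvPrefixes (PySem.Str.split₀ q)).filter (fun p => !pvHas T p)).map pvJ := by
        have hins := pv_insert_snd (PySem.Str.split₀ q) T [] (by intro x hx; cases hx) hwords
        simpa using hins
      have hNodupJ : ((pvPrefixes (PySem.Str.split₀ q)).map pvJ).Nodup := by
        refine List.Nodup.map_on ?_ (pv_prefixes_nodup _)
        intro a ha b hb hEq
        exact pv_J_inj a b (hPwordlike a ha) (hPwordlike b hb) hEq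
      have hacc' : acc ++ (pvInsert T "" (PySem.Str.split₀ q)).2
          = PySem.Set.ofList ((PP ++ pvPrefixes (PySem.Str.split₀ q)).map pvJ) := by
        rw [hsnd, hacc]
        have hsplit : PySem.Set.ofList ((PP ++ pvPrefixes (PySem.Str.split₀ q)).map pvJ)
            = PySem.Set.ofList (PP.map pvJ) ++
              ((pvPrefixes (PySem.Str.split₀ q)).map pvJ).filter
                (fun x => decide (x ∉ PySem.Set.ofList (PP.map pvJ))) := by
          conv_lhs => rw [List.map_append, PySem.Set.ofList_eq_foldl, List.foldl_append]
          rw [← PySem.Set.ofList_eq_foldl, pv_foldl_add_filter _ _ hNodupJ]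
        rw [hsplit, List.filter_map]
        congr 1
        congr 1
        apply List.filter_congr
        intro p hpmem
        have hpne : p ≠ [] := pv_prefixes_ne_nil _ p hpmem
        have hmem : pvJ p ∈ PySem.Set.ofList (PP.map pvJ) ↔ p ∈ PP := by
          rw [PySem.Set.mem_ofList]
          constructor
          · intro hm
            rcases List.mem_map.mp hm with ⟨p', hp', hEq⟩
            have heq2 := pv_J_inj p' p (hw p' hp') (hPwordlike p hpmem) hEq
            rwa [← heq2]
          · intro hm
            exact List.mem_map_of_mem hm
        by_cases hP : pvHas T p = true
        · have hmem' : pvJ p ∈ PySem.Set.ofList (PP.map pvJ) := hmem.mpr ((hinv p hpne).mp hP)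
          simp [Function.comp, hP, hmem']
        · have hPf : pvHas T p = false := by
            cases hPb : pvHas T p
            · rfl
            · exact absurd hPb hP
          have hnm : pvJ p ∉ PySem.Set.ofList (PP.map pvJ) :=
            fun hc => hP ((hinv p hpne).mpr (hmem.mp hc))
          simp [Function.comp, hPf, hnm]
      have hw' : ∀ p ∈ PP ++ pvPrefixes (PySem.Str.split₀ q), ∀ x ∈ p, pvWordlike x := by
        intro p hp
        rcases List.mem_append.mp hp with h | h
        · exact hw p h
        · exact hPwordlike p h
      have hinv' : ∀ p : List String, p ≠ [] →
          (pvHas (pvInsert T "" (PySem.Str.split₀ q)).1 p = true ↔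
            p ∈ PP ++ pvPrefixes (PySem.Str.split₀ q)) := by
        intro p hpne
        rw [pv_insert_has _ T "" p]
        simp only [Bool.or_eq_true, decide_eq_true_eq, List.mem_append, hinv p hpne]
      rw [List.foldl_cons]
      have hfin := ih (pvInsert T "" (PySem.Str.split₀ q)).1
        (acc ++ (pvInsert T "" (PySem.Str.split₀ q)).2)
        (PP ++ pvPrefixes (PySem.Str.split₀ q)) hw' hinv' hacc'
      rw [show PP ++ List.flatMap (fun q => pvPrefixes (PySem.Str.split₀ q)) (q :: qs)
            = (PP ++ pvPrefixes (PySem.Str.split₀ q)) ++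
              List.flatMap (fun q => pvPrefixes (PySem.Str.split₀ q)) qs from by
            simp [List.flatMap_cons, List.append_assoc]]
      exact hfin

-- A's flattened emission pool equals the prefix paths pool, joined
theorem pv_flat_eq (qs : List String) :
    qs.flatMap (fun q =>
      (PySem.List.pyRange 1 (((PySem.Str.split₀ q).length : Int) + 1) 1).map
        (fun i => PySem.Str.join " " (PySem.List.slice (PySem.Str.split₀ q) none (some i))))
    = (qs.flatMap (fun q => pvPrefixes (PySem.Str.split₀ q))).map pvJ := by
  induction qs with
  | nil => rfl
  | cons q t ih =>
      simp only [List.flatMap_cons, List.map_append, pv_aInner_eq, List.map_flatMap]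

-- ===== VERDICT (by name: the statement is the Claim_ definition above) =====
theorem generate_prefix_phrases_spec : Claim_equal_generate_prefix_phrases := by
  intro queries _
  unfold Spec_generate_prefix_phrases generate_prefix_phrases generate_prefix_phrases_alt
  have hA := pv_outer_fold queries []
  rw [show (([], PySem.Set.empty) : List String × PySem.Set String) = (([], []) : List String × List String) from rfl, hA]
  have hB := pv_B_fold queries PvTrie.nil [] []
    (by intro p hp; cases hp)
    (by
      intro p hp
      constructor
      · intro h
        exfalso
        cases p with
        | nil => exact hp rfl
        | cons w p' => simp [pvHas, pvFind] at h
      · intro h; cases h)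
    (by rfl)
  rw [hB]
  simp only [List.nil_append]
  rw [← PySem.Set.ofList_eq_foldl]
  congr 1
  exact pv_flat_eq queries
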